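-- pv_equiv track=rewrite | github.com/erinju7/Modelling-Discourse-Move-Sequences | src/generate_feedback_n30.py | summarize_move_sequence
-- ===== SOURCE A (Python) =====
-- def summarize_move_sequence(seq):
--     """Create a compact structural summary without exposing C2 topic content."""
--     if not seq:
--         return "No move sequence available."
--
--     summary_bits = [f"The sequence contains {len(seq)} moves."]
--     unique_moves = []
--     for move in seq:
--         if move not in unique_moves:
--             unique_moves.append(move)
--     summary_bits.append("It uses these move types: " + ", ".join(unique_moves) + ".")
--
--     repeated_runs = []
--     run_move = seq[0]
--     run_len = 1
--     for move in seq[1:]: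
--         if move == run_move:
--             run_len += 1
--         else:
--             if run_len > 1:
--                 repeated_runs.append(f"{run_move} x{run_len}")
--             run_move = move
--             run_len = 1
--     if run_len > 1:
--         repeated_runs.append(f"{run_move} x{run_len}")
--     if repeated_runs:
--         summary_bits.append("Repeated runs: " + ", ".join(repeated_runs) + ".")
--
--     summary_bits.append(f"It begins with {seq[0]} and ends with {seq[-1]}.")
--     return " ".join(summary_bits)
-- ===== SOURCE B (Python) =====
-- def summarize_move_sequence(seq):
--     """Create a compact structural summary without exposing C2 topic content."""
--     if not seq:
--         return "No move sequence available."
--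
--     bits = [f"The sequence contains {len(seq)} moves."]
--     bits.append("It uses these move types: " + ", ".join(dict.fromkeys(seq)) + ".")
--
--     repeated = []
--     rest = seq
--     while rest:
--         head = rest[0]
--         j = 1
--         while j < len(rest) and rest[j] == head:
--             j += 1
--         if j > 1:
--             repeated.append(f"{head} x{j}")
--         rest = rest[j:]
--     if repeated:
--         bits.append("Repeated runs: " + ", ".join(repeated) + ".")
--
--     bits.append(f"It begins with {seq[0]} and ends with {seq[-1]}.")
--     return " ".join(bits)
-- ===== Notes on version B (the rewrite author's own statement) =====
-- stated objective: alternative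
-- what changed: The quadratic membership-list dedup is replaced by dict.fromkeys, and the run_move/run_len state machine with end-of-loop flush is replaced by a chunking scan that finds each whole run (head, run end index) and consumes it from the front of the list.
import Mathlib
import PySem

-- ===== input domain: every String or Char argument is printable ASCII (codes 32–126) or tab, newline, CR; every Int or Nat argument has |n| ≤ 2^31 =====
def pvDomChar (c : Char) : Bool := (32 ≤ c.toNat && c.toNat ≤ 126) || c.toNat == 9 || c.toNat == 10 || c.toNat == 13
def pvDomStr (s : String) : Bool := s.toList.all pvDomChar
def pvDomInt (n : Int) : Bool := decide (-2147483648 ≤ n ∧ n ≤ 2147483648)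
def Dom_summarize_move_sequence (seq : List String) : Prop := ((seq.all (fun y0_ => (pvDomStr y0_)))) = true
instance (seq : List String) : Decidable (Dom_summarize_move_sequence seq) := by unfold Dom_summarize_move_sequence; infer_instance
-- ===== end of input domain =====

-- B replaces A's membership-list dedup with dict.fromkeys and A's run_move/run_len state
-- machine with a front-consuming run-chunking scan (objective: alternative decomposition).

-- ===== PORT A =====
-- the step of A's `for move in seq[1:]` loop, state = (repeated_runs, run_move, run_len)
def summarizeStep (st : List String × String × Int) (move : String) : List String × String × Int :=
  if move == st.2.1 then (st.1, st.2.1, st.2.2 + 1)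
  else ((if st.2.2 > 1 then st.1 ++ [st.2.1 ++ " x" ++ PySem.Int.toStr st.2.2] else st.1), move, 1)

def summarize_move_sequence (seq : List String) : String :=
  match seq with
  | [] => "No move sequence available."
  | m0 :: rest =>  -- `if not seq` handled by the match; seq[1:] on m0 :: rest is rest
    let summary_bits := ["The sequence contains " ++ PySem.Int.toStr ((m0 :: rest).length : Int) ++ " moves."]
    let unique_moves := (m0 :: rest).foldl (fun acc move => if acc.contains move then acc else acc ++ [move]) []
    let summary_bits := summary_bits ++ ["It uses these move types: " ++ PySem.Str.join ", " unique_moves ++ "."]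
    let st := rest.foldl summarizeStep ([], m0, (1 : Int))
    let repeated_runs := if st.2.2 > 1 then st.1 ++ [st.2.1 ++ " x" ++ PySem.Int.toStr st.2.2] else st.1
    let summary_bits := if repeated_runs ≠ [] then summary_bits ++ ["Repeated runs: " ++ PySem.Str.join ", " repeated_runs ++ "."] else summary_bits
    let summary_bits := summary_bits ++ ["It begins with " ++ m0 ++ " and ends with " ++ (m0 :: rest).getLast (by simp) ++ "."]
    PySem.Str.join " " summary_bits

-- ===== PORT B =====
-- inner `while j < len(rest) and rest[j] == head: j += 1`
def runEnd (rest : List String) (head : String) (j : Nat) : Nat :=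
  if h : j < rest.length then
    if rest[j] == head then runEnd rest head (j + 1) else j
  else j
termination_by rest.length - j

theorem runEnd_ge (rest : List String) (head : String) (j : Nat) : j ≤ runEnd rest head j := by
  unfold runEnd
  split
  · split
    · exact Nat.le_trans (Nat.le_succ j) (runEnd_ge rest head (j + 1))
    · exact Nat.le_refl j
  · exact Nat.le_refl j
termination_by rest.length - j

-- outer `while rest:` loop, collecting the "head xj" pieces
def collectRuns (rest : List String) : List String :=
  match rest with
  | [] => []
  | head :: tl =>
    let j := runEnd (head :: tl) head 1
    (if j > 1 then [head ++ " x" ++ PySem.Int.toStr (j : Int)] else []) ++ collectRuns ((head :: tl).drop j)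
termination_by rest.length
decreasing_by
  have h1 : 1 ≤ runEnd (head :: tl) head 1 := runEnd_ge (head :: tl) head 1
  simp [List.length_drop]
  omega

def summarize_move_sequence_alt (seq : List String) : String :=
  match seq with
  | [] => "No move sequence available."
  | m0 :: rest =>
    let bits := ["The sequence contains " ++ PySem.Int.toStr ((m0 :: rest).length : Int) ++ " moves."]
    let bits := bits ++ ["It uses these move types: " ++ PySem.Str.join ", " (PySem.List.dedup (m0 :: rest)) ++ "."]
    let repeated := collectRuns (m0 :: rest)
    let bits := if repeated ≠ [] then bits ++ ["Repeated runs: " ++ PySem.Str.join ", " repeated ++ "."] else bits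
    let bits := bits ++ ["It begins with " ++ m0 ++ " and ends with " ++ (m0 :: rest).getLast (by simp) ++ "."]
    PySem.Str.join " " bits

-- ===== PRECONDITION & SPEC =====
def Spec_summarize_move_sequence (seq : List String) (out : String) : Prop := out = summarize_move_sequence_alt seq
instance (seq : List String) (out : String) : Decidable (Spec_summarize_move_sequence seq out) := by unfold Spec_summarize_move_sequence; infer_instance

-- ===== CLAIM (what is proved, stated in full; the proofs are below) =====
def Claim_equal_summarize_move_sequence : Prop := ∀ (seq : List String), Dom_summarize_move_sequence seq → Spec_summarize_move_sequence seq (summarize_move_sequence seq)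

-- ===== LEMMAS AND PROOFS =====

-- length of the run of `head` at the front of a list
def pvRunCount (head : String) : List String → Nat
  | [] => 0
  | x :: xs => if x == head then pvRunCount head xs + 1 else 0

def pvEmit (m : String) (k : Int) : List String :=
  if k > 1 then [m ++ " x" ++ PySem.Int.toStr k] else []

theorem dedup_eq_fold (seq : List String) :
    seq.foldl (fun acc move => if acc.contains move then acc else acc ++ [move]) [] = PySem.List.dedup seq := rfl

theorem runEnd_eq (rest : List String) (head : String) (j : Nat) :
    runEnd rest head j = j + pvRunCount head (rest.drop j) := by
  unfold runEnd
  split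
  · rename_i h
    rw [List.drop_eq_getElem_cons h]
    split
    · rename_i hx
      rw [runEnd_eq rest head (j + 1)]
      simp [pvRunCount, hx]
      omega
    · rename_i hx
      simp [pvRunCount, hx]
  · rename_i h
    rw [List.drop_of_length_le (by omega)]
    simp [pvRunCount]
termination_by rest.length - j

theorem collectRuns_cons (x : String) (xs : List String) :
    collectRuns (x :: xs) =
      pvEmit x (1 + (pvRunCount x xs : Int)) ++ collectRuns (xs.drop (pvRunCount x xs)) := by
  rw [collectRuns]
  have hre : runEnd (x :: xs) x 1 = 1 + pvRunCount x xs := by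
    rw [runEnd_eq]; rfl
  have h1 : ((1 + pvRunCount x xs : Nat) : Int) = 1 + (pvRunCount x xs : Int) := by push_cast; ring
  have h3 : (x :: xs).drop (1 + pvRunCount x xs) = xs.drop (pvRunCount x xs) := by
    rw [Nat.add_comm, List.drop_succ_cons]
  rw [hre, h1, h3]
  simp only [pvEmit]
  split_ifs <;> first | rfl | omega

theorem loop_eq (tl : List String) (m0 : String) (len0 : Int) (acc : List String) :
    (let st := tl.foldl summarizeStep (acc, m0, len0);
     if st.2.2 > 1 then st.1 ++ [st.2.1 ++ " x" ++ PySem.Int.toStr st.2.2] else st.1)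
    = acc ++ pvEmit m0 (len0 + (pvRunCount m0 tl : Int)) ++ collectRuns (tl.drop (pvRunCount m0 tl)) := by
  induction tl generalizing m0 len0 acc with
  | nil =>
    simp only [List.foldl_nil, pvRunCount, List.drop_nil, collectRuns, pvEmit]
    simp only [Nat.cast_zero, add_zero, List.append_nil]
    split <;> simp
  | cons x xs ih =>
    by_cases hx : (x == m0) = true
    · simp only [List.foldl_cons, summarizeStep, hx, if_true]
      rw [ih]
      simp only [pvRunCount, hx, if_true]
      have hc : len0 + 1 + (pvRunCount m0 xs : Int) = len0 + ((pvRunCount m0 xs + 1 : Nat) : Int) := by push_cast; ring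
      rw [hc, List.drop_succ_cons]
    · simp only [List.foldl_cons]
      rw [show summarizeStep (acc, m0, len0) x
            = ((if len0 > 1 then acc ++ [m0 ++ " x" ++ PySem.Int.toStr len0] else acc), x, (1 : Int)) from by
          simp [summarizeStep, hx]]
      rw [ih]
      simp only [pvRunCount, if_neg hx, Nat.cast_zero, add_zero, List.drop_zero]
      rw [collectRuns_cons]
      simp only [pvEmit, List.append_assoc]
      split <;> simp

theorem runs_eq (m0 : String) (rest : List String) :
    (let st := rest.foldl summarizeStep ([], m0, (1 : Int));
     if st.2.2 > 1 then st.1 ++ [st.2.1 ++ " x" ++ PySem.Int.toStr st.2.2] else st.1)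
    = collectRuns (m0 :: rest) := by
  rw [loop_eq, collectRuns_cons]
  simp

-- ===== VERDICT (by name: the statement is the Claim_ definition above) =====
theorem summarize_move_sequence_spec : Claim_equal_summarize_move_sequence := by
  intro seq _
  unfold Spec_summarize_move_sequence
  match seq with
  | [] => rfl
  | m0 :: rest =>
    simp only [summarize_move_sequence, summarize_move_sequence_alt,
      dedup_eq_fold, runs_eq]
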